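-- pv_equiv track=rewrite | github.com/CogCulture/Geo-V2 | GEO-backend/services/scoring_engine.py | calculate_relative_rank
-- ===== SOURCE A (Python) =====
-- def calculate_relative_rank(response_text, brand_name, competitors):
--     """
--     Calculate rank based on order of first appearance in the text,
--     only among the TRACKED set (brand + competitors).
--
--     Rank is capped at the size of the tracked set so it is always
--     a meaningful 1-to-N value (e.g. 1-5 when monitoring 4 competitors).
--     """
--     if not brand_name:
--         return 0
--
--     text_lower = response_text.lower()
--     brand_lower = brand_name.lower()
--
--     # Find first occurrence of main brand
--     brand_index = text_lower.find(brand_lower)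
--     if brand_index == -1:
--         return 0
--
--     # Build a deduplicated competitor list (case-insensitive)
--     seen = {brand_lower}
--     unique_competitors = []
--     if competitors:
--         for comp in competitors:
--             if not comp:
--                 continue
--             comp_lower = comp.lower()
--             if comp_lower not in seen:
--                 seen.add(comp_lower)
--                 unique_competitors.append(comp)
--
--     # Build tracked entities: (first_occurrence_index, name)
--     found_entities = [(brand_index, brand_name)]
--     for comp in unique_competitors:
--         idx = text_lower.find(comp.lower())
--         if idx != -1:
--             found_entities.append((idx, comp))
--
--     # Sort by first appearance order in response
--     found_entities.sort(key=lambda x: x[0])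
--
--     # Find the rank of the main brand (1-based)
--     for rank, (_, name) in enumerate(found_entities, 1):
--         if name.lower() == brand_lower:
--             # Cap: rank cannot exceed total tracked entities found
--             return min(rank, len(found_entities))
--
--     return 0
-- ===== SOURCE B (Python) =====
-- def calculate_relative_rank(response_text, brand_name, competitors):
--     """Rank of the brand by first appearance among the tracked set, without
--     building/sorting an entity list: count tracked competitors that appear
--     strictly before the brand and add one."""
--     if not brand_name:
--         return 0
--
--     text_lower = response_text.lower()
--     brand_lower = brand_name.lower()
--
--     brand_index = text_lower.find(brand_lower)
--     if brand_index == -1: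
--         return 0
--
--     seen = {brand_lower}
--     rank = 1
--     for comp in competitors:
--         if not comp:
--             continue
--         comp_lower = comp.lower()
--         if comp_lower in seen:
--             continue
--         seen.add(comp_lower)
--         idx = text_lower.find(comp_lower)
--         if idx != -1 and idx < brand_index:
--             rank += 1
--     return rank
-- ===== Notes on version B (the rewrite author's own statement) =====
-- stated objective: simpler
-- what changed: B drops A's build-(index,name)-tuples / stable-sort / scan-for-brand / min-cap pipeline and instead fuses dedup and ranking into one counting pass: rank = 1 + number of distinct tracked competitors whose first occurrence is strictly before the brand's.
import Mathlib
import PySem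

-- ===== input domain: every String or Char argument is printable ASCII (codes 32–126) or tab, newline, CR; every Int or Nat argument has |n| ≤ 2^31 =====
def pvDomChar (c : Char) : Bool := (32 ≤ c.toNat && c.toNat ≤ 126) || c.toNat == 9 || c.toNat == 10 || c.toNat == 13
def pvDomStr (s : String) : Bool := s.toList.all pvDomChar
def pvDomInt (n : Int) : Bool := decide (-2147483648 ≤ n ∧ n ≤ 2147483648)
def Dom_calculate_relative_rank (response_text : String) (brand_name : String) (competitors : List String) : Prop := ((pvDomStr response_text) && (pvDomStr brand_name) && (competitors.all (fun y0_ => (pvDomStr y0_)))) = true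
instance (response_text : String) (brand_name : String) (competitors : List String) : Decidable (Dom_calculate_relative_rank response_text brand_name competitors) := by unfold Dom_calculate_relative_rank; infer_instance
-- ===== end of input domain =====

-- B replaces A's tuple-list + stable sort + scan + min-cap by a single counting pass (rank = 1 + competitors first appearing strictly before the brand); proved equal on all inputs.


-- ===== PORT A =====
-- the dedup loop of A: state = (seen, unique_competitors)
def pvDedup (st : PySem.Set String × List String) (comp : String) : PySem.Set String × List String :=
  if comp = "" then st
  else
    let comp_lower := PySem.Str.lower comp
    if PySem.Set.contains st.1 comp_lower then st
    else (PySem.Set.add st.1 comp_lower, st.2 ++ [comp])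

-- the found_entities loop of A
def pvCollect (text_lower : String) (acc : List (Int × String)) (comp : String) : List (Int × String) :=
  let idx := PySem.Str.find text_lower (PySem.Str.lower comp)
  if idx ≠ -1 then acc ++ [(idx, comp)] else acc

-- the final 'for rank, (_, name) in enumerate(found_entities, 1): if …: return min(rank, total)' loop of A
def pvRankLoop (brand_lower : String) (total : Int) : List (Int × String) → Int → Int
  | [], _ => 0
  | (_, name) :: rest, r =>
      if PySem.Str.lower name = brand_lower then min r total else pvRankLoop brand_lower total rest (r + 1)

def calculate_relative_rank (response_text : String) (brand_name : String) (competitors : List String) : Int :=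
  if brand_name = "" then 0
  else
    let text_lower := PySem.Str.lower response_text
    let brand_lower := PySem.Str.lower brand_name
    let brand_index := PySem.Str.find text_lower brand_lower
    if brand_index = -1 then 0
    else
      let st := competitors.foldl pvDedup (PySem.Set.ofList [brand_lower], [])
      let unique_competitors := st.2
      let found_entities := unique_competitors.foldl (pvCollect text_lower) [(brand_index, brand_name)]
      let sorted_entities := PySem.List.sorted found_entities (fun x => x.1)
      pvRankLoop brand_lower (sorted_entities.length : Int) sorted_entities 1

-- ===== PORT B =====
-- the single counting pass of B: state = (seen, rank)
def pvCount (text_lower : String) (brand_index : Int) (st : PySem.Set String × Int) (comp : String) :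
    PySem.Set String × Int :=
  if comp = "" then st
  else
    let comp_lower := PySem.Str.lower comp
    if PySem.Set.contains st.1 comp_lower then st
    else
      let idx := PySem.Str.find text_lower comp_lower
      (PySem.Set.add st.1 comp_lower, if idx ≠ -1 ∧ idx < brand_index then st.2 + 1 else st.2)

def calculate_relative_rank_alt (response_text : String) (brand_name : String) (competitors : List String) : Int :=
  if brand_name = "" then 0
  else
    let text_lower := PySem.Str.lower response_text
    let brand_lower := PySem.Str.lower brand_name
    let brand_index := PySem.Str.find text_lower brand_lower
    if brand_index = -1 then 0
    else (competitors.foldl (pvCount text_lower brand_index) (PySem.Set.ofList [brand_lower], 1)).2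

-- ===== PRECONDITION & SPEC =====
def Spec_calculate_relative_rank (response_text : String) (brand_name : String) (competitors : List String) (out : Int) : Prop := out = calculate_relative_rank_alt response_text brand_name competitors
instance (response_text : String) (brand_name : String) (competitors : List String) (out : Int) : Decidable (Spec_calculate_relative_rank response_text brand_name competitors out) := by unfold Spec_calculate_relative_rank; infer_instance

-- ===== CLAIM (what is proved, stated in full; the proofs are below) =====
def Claim_equal_calculate_relative_rank : Prop := ∀ (response_text : String) (brand_name : String) (competitors : List String), Dom_calculate_relative_rank response_text brand_name competitors → Spec_calculate_relative_rank response_text brand_name competitors (calculate_relative_rank response_text brand_name competitors)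

-- ===== LEMMAS AND PROOFS =====

-- the predicate B counts with (tl = lowered text, b = brand's first index)
def pvBefore (tl : String) (b : Int) (c : String) : Bool :=
  decide (PySem.Str.find tl (PySem.Str.lower c) ≠ -1 ∧ PySem.Str.find tl (PySem.Str.lower c) < b)

-- A's dedup fold only appends to its list component
theorem pvDedup_append (comps : List String) (seen : PySem.Set String) (ul : List String) :
    (comps.foldl pvDedup (seen, ul)).2 = ul ++ (comps.foldl pvDedup (seen, [])).2 := by
  induction comps generalizing seen ul with
  | nil => simp
  | cons c cs ih =>
      by_cases hc : c = ""
      · simpa [pvDedup, hc] using ih seen ul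
      · by_cases hm : PySem.Str.lower c ∈ seen
        · simpa [pvDedup, hc, hm] using ih seen ul
        · simp [pvDedup, hc, hm, ih (seen ++ [PySem.Str.lower c]) [c],
                ih (seen ++ [PySem.Str.lower c]) (ul ++ [c])]

-- every name A's dedup keeps has a lowercase different from anything already in seen
theorem pvDedup_lower_ne (comps : List String) (seen : PySem.Set String) (s0 : String)
    (hs : s0 ∈ seen) : ∀ c ∈ (comps.foldl pvDedup (seen, [])).2, PySem.Str.lower c ≠ s0 := by
  induction comps generalizing seen with
  | nil => simp
  | cons c cs ih =>
      by_cases hc : c = ""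
      · simpa [pvDedup, hc] using ih seen hs
      · by_cases hm : PySem.Str.lower c ∈ seen
        · simpa [pvDedup, hc, hm] using ih seen hs
        · intro x hx
          simp [pvDedup, hc, hm] at hx
          rw [pvDedup_append] at hx
          simp only [List.mem_append, List.mem_cons, List.not_mem_nil, or_false] at hx
          rcases hx with hx | hx
          · subst hx
            intro h
            exact hm (h ▸ hs)
          · exact ih (seen ++ [PySem.Str.lower c]) (List.mem_append_left _ hs) x hx

-- B's single pass counts exactly the pvBefore-elements of A's deduplicated list
theorem pvCount_eq_countP (tl : String) (b : Int) (comps : List String) (seen : PySem.Set String) (r : Int) :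
    (comps.foldl (pvCount tl b) (seen, r)).2
      = r + ((comps.foldl pvDedup (seen, [])).2.countP (pvBefore tl b)) := by
  induction comps generalizing seen r with
  | nil => simp
  | cons c cs ih =>
      by_cases hc : c = ""
      · simpa [pvCount, pvDedup, hc] using ih seen r
      · by_cases hm : PySem.Str.lower c ∈ seen
        · simpa [pvCount, pvDedup, hc, hm] using ih seen r
        · simp only [List.foldl_cons]
          have hmc : seen.contains (PySem.Str.lower c) = false := by simpa using hm
          rw [show pvCount tl b (seen, r) c
              = (seen ++ [PySem.Str.lower c],
                  if PySem.Str.find tl (PySem.Str.lower c) ≠ -1 ∧ PySem.Str.find tl (PySem.Str.lower c) < b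
                  then r + 1 else r) from by simp [pvCount, hc, hm, PySem.Set.add],
            show pvDedup (seen, []) c = (seen ++ [PySem.Str.lower c], [c]) from by
              simp [pvDedup, hc, hm, PySem.Set.add],
            ih]
          rw [pvDedup_append cs (seen ++ [PySem.Str.lower c]) [c], List.singleton_append,
            List.countP_cons]
          by_cases hb : PySem.Str.find tl (PySem.Str.lower c) ≠ -1 ∧ PySem.Str.find tl (PySem.Str.lower c) < b
          · rw [if_pos hb, show pvBefore tl b c = true from decide_eq_true hb]
            simp only [reduceIte]
            push_cast
            ring
          · rw [if_neg hb, show pvBefore tl b c = false from decide_eq_false hb]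
            simp only [Bool.false_eq_true, reduceIte]
            push_cast
            ring

-- A's found_entities loop is append-of-filtered-map (cites PySem.List.foldl_append_if)
theorem pvCollect_spec (tl : String) (l : List String) (acc : List (Int × String)) :
    l.foldl (pvCollect tl) acc
      = acc ++ (l.filter (fun c => !decide (PySem.Str.find tl (PySem.Str.lower c) = -1))).map
          (fun c => (PySem.Str.find tl (PySem.Str.lower c), c)) := by
  have e : pvCollect tl = fun acc c =>
      if (!decide (PySem.Str.find tl (PySem.Str.lower c) = -1)) = true
      then acc ++ [(PySem.Str.find tl (PySem.Str.lower c), c)] else acc := by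
    funext acc c
    by_cases h : PySem.Str.find tl (PySem.Str.lower c) = -1 <;> simp [pvCollect]
  rw [e]
  exact PySem.List.foldl_append_if _ _ l acc

theorem pvInsertBy_length (before : Int × String → Int × String → Bool) (x : Int × String)
    (ys : List (Int × String)) : (PySem.List.insertBy before x ys).length = ys.length + 1 := by
  induction ys with
  | nil => rfl
  | cons y ys ih =>
      show (if before x y then x :: y :: ys else y :: PySem.List.insertBy before x ys).length = _
      by_cases h : before x y = true <;> simp [h, ih]

-- inserting an element whose key is below the pivot's lands left of the pivot
theorem pvInsertBy_lt (x m : Int × String) (u v : List (Int × String)) (hx : x.1 < m.1) :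
    PySem.List.insertBy (fun a b => decide (a.1 < b.1)) x (u ++ m :: v)
      = PySem.List.insertBy (fun a b => decide (a.1 < b.1)) x u ++ m :: v := by
  induction u with
  | nil => simp [show PySem.List.insertBy (fun a b => decide (a.1 < b.1)) x (m :: v)
      = if decide (x.1 < m.1) then x :: m :: v else m :: PySem.List.insertBy _ x v from rfl,
      show PySem.List.insertBy (fun a b => decide (a.1 < b.1)) x ([] : List (Int × String)) = [x] from rfl, hx]
  | cons y u ih =>
      show (if decide (x.1 < y.1) then x :: (y :: (u ++ m :: v)) else y :: PySem.List.insertBy _ x (u ++ m :: v))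
        = (if decide (x.1 < y.1) then x :: y :: u else y :: PySem.List.insertBy _ x u) ++ m :: v
      by_cases h : x.1 < y.1 <;> simp [h, ih]

-- inserting an element whose key is at least the pivot's lands right of the pivot (when all of u is below it)
theorem pvInsertBy_ge (x m : Int × String) (u v : List (Int × String))
    (hu : ∀ y ∈ u, ¬ x.1 < y.1) (hm : ¬ x.1 < m.1) :
    PySem.List.insertBy (fun a b => decide (a.1 < b.1)) x (u ++ m :: v)
      = u ++ m :: PySem.List.insertBy (fun a b => decide (a.1 < b.1)) x v := by
  induction u with
  | nil => simp [show PySem.List.insertBy (fun a b => decide (a.1 < b.1)) x (m :: v)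
      = if decide (x.1 < m.1) then x :: m :: v else m :: PySem.List.insertBy _ x v from rfl, hm]
  | cons y u ih =>
      have hy : ¬ x.1 < y.1 := hu y (by simp)
      show (if decide (x.1 < y.1) then x :: (y :: (u ++ m :: v)) else y :: PySem.List.insertBy _ x (u ++ m :: v)) = _
      simp [hy, ih fun z hz => hu z (by simp [hz])]

-- invariant of A's (stable insertion) sort: the pivot stays after exactly the strictly-smaller keys
theorem pvSort_invariant (bn : String) (b : Int) (Q : Int × String → Prop) :
    ∀ (es u v : List (Int × String)),
      (∀ y ∈ u, y.1 < b ∧ Q y) → (∀ y ∈ v, ¬ y.1 < b ∧ Q y) → (∀ y ∈ es, Q y) →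
      ∃ u' v', es.foldl (fun acc x => PySem.List.insertBy (fun a b => decide (a.1 < b.1)) x acc) (u ++ (b, bn) :: v)
          = u' ++ (b, bn) :: v'
        ∧ u'.length = u.length + es.countP (fun x => decide (x.1 < b))
        ∧ (∀ y ∈ u', y.1 < b ∧ Q y) ∧ (∀ y ∈ v', ¬ y.1 < b ∧ Q y) := by
  intro es
  induction es with
  | nil => intro u v hu hv _; exact ⟨u, v, by simp, by simp, hu, hv⟩
  | cons x es ih =>
      intro u v hu hv hes
      by_cases hx : x.1 < b
      · have step : PySem.List.insertBy (fun a b => decide (a.1 < b.1)) x (u ++ (b, bn) :: v)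
            = PySem.List.insertBy (fun a b => decide (a.1 < b.1)) x u ++ (b, bn) :: v :=
          pvInsertBy_lt x (b, bn) u v hx
        obtain ⟨u', v', h1, h2, h3, h4⟩ := ih (PySem.List.insertBy (fun a b => decide (a.1 < b.1)) x u) v
          (by intro y hy
              rcases (PySem.List.mem_insertBy _ x y u).1 hy with h | h
              · exact h ▸ ⟨hx, hes x (by simp)⟩
              · exact hu y h)
          hv (fun y hy => hes y (by simp [hy]))
        refine ⟨u', v', by simpa [step] using h1, ?_, h3, h4⟩
        rw [h2, pvInsertBy_length]
        simp [hx]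
        omega
      · have step : PySem.List.insertBy (fun a b => decide (a.1 < b.1)) x (u ++ (b, bn) :: v)
            = u ++ (b, bn) :: PySem.List.insertBy (fun a b => decide (a.1 < b.1)) x v :=
          pvInsertBy_ge x (b, bn) u v (fun y hy => fun h => hx (lt_trans h (hu y hy).1)) hx
        obtain ⟨u', v', h1, h2, h3, h4⟩ := ih u (PySem.List.insertBy (fun a b => decide (a.1 < b.1)) x v) hu
          (by intro y hy
              rcases (PySem.List.mem_insertBy _ x y v).1 hy with h | h
              · exact h ▸ ⟨hx, hes x (by simp)⟩
              · exact hv y h)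
          (fun y hy => hes y (by simp [hy]))
        refine ⟨u', v', by simpa [step] using h1, ?_, h3, h4⟩
        rw [h2]
        simp [hx]
  
-- A's final scan on a list u ++ pivot :: v where nothing in u matches returns min (r + |u|) total
theorem pvRankLoop_spec (bl bn : String) (b : Int) (hbn : PySem.Str.lower bn = bl)
    (u v : List (Int × String)) (hu : ∀ y ∈ u, PySem.Str.lower y.2 ≠ bl) (r total : Int) :
    pvRankLoop bl total (u ++ (b, bn) :: v) r = min (r + (u.length : Int)) total := by
  induction u generalizing r with
  | nil => simp [pvRankLoop, hbn]
  | cons y u ih =>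
      obtain ⟨yi, yn⟩ := y
      have hy : PySem.Str.lower yn ≠ bl := hu (yi, yn) (by simp)
      have step : pvRankLoop bl total ((yi, yn) :: (u ++ (b, bn) :: v)) r
          = pvRankLoop bl total (u ++ (b, bn) :: v) (r + 1) := by
        simp [pvRankLoop, hy]
      rw [List.cons_append, step, ih (fun z hz => hu z (by simp [hz]))]
      simp only [List.length_cons]
      push_cast
      omega

-- ===== VERDICT (by name: the statement is the Claim_ definition above) =====
theorem calculate_relative_rank_spec : Claim_equal_calculate_relative_rank := by
  intro rt bn comps _
  unfold Spec_calculate_relative_rank calculate_relative_rank calculate_relative_rank_alt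
  by_cases h0 : bn = ""
  · simp [h0]
  · simp only [if_neg h0]
    by_cases h1 : PySem.Str.find (PySem.Str.lower rt) (PySem.Str.lower bn) = -1
    · rw [if_pos h1, if_pos h1]
    · simp only [if_neg h1]
      set tl := PySem.Str.lower rt with htl
      set bl := PySem.Str.lower bn with hbl
      set b := PySem.Str.find tl bl with hb
      set uniq := (comps.foldl pvDedup (PySem.Set.ofList [bl], [])).2 with huniq
      have hblmem : bl ∈ PySem.Set.ofList [bl] := by simp [PySem.Set.ofList, PySem.Set.add, PySem.Set.empty]
      have hQ : ∀ c ∈ uniq, PySem.Str.lower c ≠ bl := pvDedup_lower_ne comps _ bl hblmem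
      rw [pvCount_eq_countP, pvCollect_spec, PySem.List.sorted_eq_foldl_insertBy]
      set ents := List.map (fun c => (PySem.Str.find tl (PySem.Str.lower c), c))
        (List.filter (fun c => !decide (PySem.Str.find tl (PySem.Str.lower c) = -1)) uniq) with hents
      rw [List.singleton_append, List.foldl_cons,
        show PySem.List.insertBy (fun a b => decide (a.1 < b.1)) ((b, bn) : Int × String) [] = [(b, bn)] from rfl]
      have hes : ∀ y ∈ ents, PySem.Str.lower y.2 ≠ bl := by
        intro y hy
        rw [hents] at hy
        simp only [List.mem_map] at hy
        obtain ⟨c, hc, rfl⟩ := hy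
        exact hQ c (List.mem_of_mem_filter hc)
      obtain ⟨u', v', hS, hlen, hU, hV⟩ := pvSort_invariant bn b
        (fun y => PySem.Str.lower y.2 ≠ bl) ents [] [] (by simp) (by simp) hes
      rw [show ([(b, bn)] : List (Int × String)) = [] ++ (b, bn) :: [] from rfl, hS,
        pvRankLoop_spec bl bn b rfl u' v' (fun y hy => (hU y hy).2) 1 _]
      have hgen : ∀ (x y : Int), (decide (x < y) && !decide (x = -1)) = decide (x ≠ -1 ∧ x < y) := by
        intro x y
        by_cases hx1 : x = -1 <;> by_cases hx2 : x < y <;> simp [hx1, hx2]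
      have hcnt : ents.countP (fun x => decide (x.1 < b)) = uniq.countP (pvBefore tl b) := by
        rw [hents, List.countP_map, List.countP_filter]
        congr 1
        funext c
        simp only [Function.comp, pvBefore]
        exact hgen _ _
      rw [← huniq, ← hcnt, hlen]
      simp only [List.length_append, List.length_cons, List.length_nil]
      push_cast
      omega
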